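-- pv_equiv track=rewrite | github.com/alexgooding/meta-data-modifier | meta_modifier.py | retrieve_track_number
-- ===== SOURCE A (Python) =====
-- def retrieve_track_number(name):
--     name = name.lstrip()
--     track_number = []
--     for char in name:
--         if char.isdigit():
--             if char != '0' or track_number:
--                 track_number.append(char)
--         else:
--             break
--
--     return "".join(track_number)
-- ===== SOURCE B (Python) =====
-- def retrieve_track_number(name):
--     name = name.lstrip()
--     i = 0
--     while i < len(name) and name[i].isdigit():
--         i += 1
--     return name[:i].lstrip('0')
-- ===== Notes on version B (the rewrite author's own statement) =====
-- stated objective: simpler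
-- what changed: Replaces A's fused accumulator loop (collect digits while skipping leading zeros, break otherwise) with two plain passes: an index scan measuring the digit prefix, then a slice whose leading zeros are then stripped off.
import Mathlib
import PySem

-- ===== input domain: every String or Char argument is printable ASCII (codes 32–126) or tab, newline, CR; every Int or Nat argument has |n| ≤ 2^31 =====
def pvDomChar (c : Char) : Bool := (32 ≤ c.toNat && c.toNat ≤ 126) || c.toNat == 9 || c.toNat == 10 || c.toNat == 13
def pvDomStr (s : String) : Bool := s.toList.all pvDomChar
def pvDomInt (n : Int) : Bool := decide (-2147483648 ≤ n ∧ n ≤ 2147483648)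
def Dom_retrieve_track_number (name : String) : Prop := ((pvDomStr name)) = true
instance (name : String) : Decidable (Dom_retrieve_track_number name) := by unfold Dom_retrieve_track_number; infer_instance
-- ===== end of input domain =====

-- B replaces A's fused collect-digits-while-skipping-zeros loop with a digit-prefix scan plus a leading-zero strip (objective: simpler).

-- ===== PORT A =====
-- the for-loop with break: track_number is the accumulator, in order
def pvLoopA : List Char → List Char → List Char
  | [], acc => acc
  | c :: rest, acc =>
      if PySem.Chars.isdigit c then
        if c != '0' || !acc.isEmpty then pvLoopA rest (acc ++ [c])
        else pvLoopA rest acc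
      else acc

def retrieve_track_number (name : String) : String :=
  String.ofList (pvLoopA (PySem.Str.lstrip name).toList [])

-- ===== PORT B =====
-- the while loop 'i += 1 while name[i].isdigit()': length of the digit prefix
def pvDigitLen : List Char → Nat
  | [] => 0
  | c :: rest => if PySem.Chars.isdigit c then pvDigitLen rest + 1 else 0

-- name[:i] is List.take i; .lstrip('0') on a digit-only string is exactly dropWhile (== '0')
def retrieve_track_number_alt (name : String) : String :=
  let s := (PySem.Str.lstrip name).toList
  String.ofList ((s.take (pvDigitLen s)).dropWhile (· == '0'))

-- ===== PRECONDITION & SPEC =====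
def Spec_retrieve_track_number (name : String) (out : String) : Prop := out = retrieve_track_number_alt name
instance (name : String) (out : String) : Decidable (Spec_retrieve_track_number name out) := by unfold Spec_retrieve_track_number; infer_instance

-- ===== CLAIM (what is proved, stated in full; the proofs are below) =====
def Claim_equal_retrieve_track_number : Prop := ∀ (name : String), Dom_retrieve_track_number name → Spec_retrieve_track_number name (retrieve_track_number name)

-- ===== LEMMAS AND PROOFS =====

-- once the accumulator is nonempty, the loop just appends every further digit of the prefix
theorem pvLoopA_ne_nil (l : List Char) (a : Char) (acc : List Char) :
    pvLoopA l (a :: acc) = (a :: acc) ++ l.take (pvDigitLen l) := by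
  induction l generalizing a acc with
  | nil => simp [pvLoopA, pvDigitLen]
  | cons c rest ih =>
    by_cases hd : PySem.Chars.isdigit c
    · have : (a :: acc) ++ [c] = a :: (acc ++ [c]) := by simp
      simp [pvLoopA, pvDigitLen, hd, this, ih]
    · simp [pvLoopA, pvDigitLen, hd]

theorem pvLoopA_nil (l : List Char) :
    pvLoopA l [] = (l.take (pvDigitLen l)).dropWhile (· == '0') := by
  induction l with
  | nil => simp [pvLoopA, pvDigitLen]
  | cons c rest ih =>
    by_cases hd : PySem.Chars.isdigit c
    · by_cases hz : c = '0'
      · subst hz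
        simp [pvLoopA, hd, pvDigitLen, ih]
      · have hbne : (c != '0') = true := by simp [hz]
        simp [pvLoopA, hd, hz, pvDigitLen, hbne, pvLoopA_ne_nil]
    · simp [pvLoopA, hd, pvDigitLen]

-- ===== VERDICT (by name: the statement is the Claim_ definition above) =====
theorem retrieve_track_number_spec : Claim_equal_retrieve_track_number := by
  intro name _
  unfold Spec_retrieve_track_number retrieve_track_number retrieve_track_number_alt
  simp [pvLoopA_nil]
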